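-- pv_equiv track=rewrite | github.com/M-Abdiu/AP_Exercises_Mehmedali | Unit_2/02_python_examples/01_eliza.py | _tokenize_script
-- ===== SOURCE A (Python) =====
-- from typing import Any, Dict, List, Optional, Sequence, Tuple, Union
--
-- _PUNCT = {".", ",", "?", "!", ";", ":"}
--
-- _SCRIPT_SINGLE = {"(", ")", "=", "*", "/"} | _PUNCT
--
-- def _strip_script_comments(text: str) -> str:
--     # Script comments use ';' to end-of-line.
--     out_lines: List[str] = []
--     for line in text.splitlines():
--         if ";" in line:
--             line = line.split(";", 1)[0]
--         out_lines.append(line)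
--     return "\n".join(out_lines)
--
-- def _tokenize_script(text: str) -> List[str]:
--     text = _strip_script_comments(text)
--     toks: List[str] = []
--     i = 0
--     n = len(text)
--     while i < n:
--         c = text[i]
--         if c.isspace():
--             i += 1
--             continue
--         if c in _SCRIPT_SINGLE:
--             toks.append(c)
--             i += 1
--             continue
--         j = i
--         while j < n and (not text[j].isspace()) and (text[j] not in _SCRIPT_SINGLE):
--             j += 1
--         toks.append(text[i:j].upper())
--         i = j
--
--     # split trailing punctuation like HELLO. => HELLO .
--     split: List[str] = []
--     for t in toks:
--         if len(t) >= 2 and t[-1] in _PUNCT and all(ch not in _SCRIPT_SINGLE for ch in t[:-1]):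
--             split.append(t[:-1])
--             split.append(t[-1])
--         else:
--             split.append(t)
--     return [t for t in split if t]
-- ===== SOURCE B (Python) =====
-- _SPECIAL = "()=*/.,?!;:"
--
-- def _tokenize_script(text: str):
--     stripped = "\n".join(line.split(";", 1)[0] for line in text.splitlines())
--     padded = "".join(" " + c + " " if c in _SPECIAL else c.upper() for c in stripped)
--     return padded.split()
-- ===== Notes on version B (the rewrite author's own statement) =====
-- stated objective: idiomatic
-- what changed: Replaces A's manual index-based while-scan (plus its dead trailing-punctuation pass and empty-token filter) by padding each special character with spaces, uppercasing the rest char-wise, and calling str.split().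
import Mathlib
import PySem

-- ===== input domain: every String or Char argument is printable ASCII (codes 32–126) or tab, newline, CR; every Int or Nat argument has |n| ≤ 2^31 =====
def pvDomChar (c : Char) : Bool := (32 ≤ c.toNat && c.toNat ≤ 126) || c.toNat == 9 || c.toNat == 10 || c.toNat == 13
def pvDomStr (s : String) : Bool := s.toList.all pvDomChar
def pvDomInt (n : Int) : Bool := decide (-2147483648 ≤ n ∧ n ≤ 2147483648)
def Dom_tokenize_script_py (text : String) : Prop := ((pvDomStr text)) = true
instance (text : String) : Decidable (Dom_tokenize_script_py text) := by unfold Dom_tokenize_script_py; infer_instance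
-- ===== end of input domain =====

-- B replaces A's manual index scan (plus its dead trailing-punctuation pass and empty filter)
-- by space-padding the special characters, uppercasing the rest char-wise, and calling str.split().

-- ===== PORT A =====
-- Python set membership is order-independent: the sets of 1-char strings are modelled as char sets.
def pvPunct : PySem.Set Char := PySem.Set.ofList ['.', ',', '?', '!', ';', ':']
def pvScriptSingle : PySem.Set Char := PySem.Set.union (PySem.Set.ofList ['(', ')', '=', '*', '/']) pvPunct

def pvStrip (text : List Char) : List Char :=
  let out_lines := (PySem.Chars.splitlines text).foldl (fun acc line =>
    let line := if PySem.Chars.isIn [';'] line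
      then (PySem.Chars.splitOnMax line [';'] 1).headD []   -- line.split(';', 1)[0]: split never returns [], so [0] is the head
      else line
    acc ++ [line]) []
  PySem.Chars.join ['\n'] out_lines

-- the inner 'while j < n and …' loop of A, returning the final j
def pvScanWord (text : List Char) (j : Nat) : Nat :=
  if h : j < text.length then
    if (!PySem.Chars.isspace text[j] && !PySem.Set.contains pvScriptSingle text[j]) then
      pvScanWord text (j+1)
    else j
  else j
termination_by text.length - j

-- termination facts for pvScanA (cited by its decreasing_by)
theorem pvScanWord_ge (text : List Char) (j : Nat) : j ≤ pvScanWord text j := by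
  fun_induction pvScanWord text j <;> omega

theorem pvScanWord_gt (text : List Char) (j : Nat) (h : j < text.length)
    (hc : (!PySem.Chars.isspace text[j] && !PySem.Set.contains pvScriptSingle text[j]) = true) :
    j < pvScanWord text j := by
  rw [pvScanWord]
  simp only [h, hc, dif_pos, if_pos]
  exact Nat.lt_of_lt_of_le (Nat.lt_succ_self j) (pvScanWord_ge text (j+1))

-- the outer 'while i < n' loop of A, accumulating toks
def pvScanA (text : List Char) (i : Nat) (toks : List (List Char)) : List (List Char) :=
  if h : i < text.length then
    if hsp : PySem.Chars.isspace text[i] then pvScanA text (i+1) toks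
    else if hsg : PySem.Set.contains pvScriptSingle text[i] then pvScanA text (i+1) (toks ++ [[text[i]]])
    else pvScanA text (pvScanWord text i)
      (toks ++ [PySem.Chars.upper (PySem.List.slice text (some (i : Int)) (some ((pvScanWord text i : Nat) : Int)))])
  else toks
termination_by text.length - i
decreasing_by
  · omega
  · omega
  · have := pvScanWord_gt text i h (by
      simp only [Bool.and_eq_true, Bool.not_eq_true']
      exact ⟨Bool.eq_false_iff.mpr hsp, Bool.eq_false_iff.mpr hsg⟩)
    omega

def tokenize_script_py (text : String) : List String :=
  let t := pvStrip text.toList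
  let toks := pvScanA t 0 []
  let split := toks.foldl (fun acc tk =>
    match PySem.List.pyGet? tk (-1) with   -- t[-1]; Python evaluates it only under len(t) ≥ 2, where it cannot fail
    | some last =>
      if 2 ≤ tk.length ∧ PySem.Set.contains pvPunct last = true ∧
          (PySem.List.slice tk none (some (-1))).all (fun ch => !PySem.Set.contains pvScriptSingle ch) then
        acc ++ [PySem.List.slice tk none (some (-1)), [last]]
      else acc ++ [tk]
    | none => acc ++ [tk]) []            -- len(t) ≥ 2 is false for an empty t, so Python also appends t unchanged
  (split.filter (fun tk => !tk.isEmpty)).map String.ofList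

-- ===== PORT B =====
-- the string constant _SPECIAL = "()=*/.,?!;:" as its characters
def pvSpecialB : List Char := ['(', ')', '=', '*', '/', '.', ',', '?', '!', ';', ':']

def tokenize_script_py_alt (text : String) : List String :=
  let stripped := PySem.Chars.join ['\n']
    ((PySem.Chars.splitlines text.toList).map (fun line => (PySem.Chars.splitOnMax line [';'] 1).headD []))
  let padded := (stripped.map (fun c =>
    if pvSpecialB.contains c then [' ', c, ' '] else [PySem.Chars.upperChar c])).flatten
  (PySem.Chars.split₀ padded).map String.ofList

-- ===== PRECONDITION & SPEC =====
def Spec_tokenize_script_py (text : String) (out : List String) : Prop := out = tokenize_script_py_alt text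
instance (text : String) (out : List String) : Decidable (Spec_tokenize_script_py text out) := by unfold Spec_tokenize_script_py; infer_instance

-- ===== CLAIM (what is proved, stated in full; the proofs are below) =====
def Claim_equal_tokenize_script_py : Prop := ∀ (text : String), Dom_tokenize_script_py text → Spec_tokenize_script_py text (tokenize_script_py text)

-- ===== LEMMAS AND PROOFS =====

-- the word-character predicate (char neither whitespace nor a _SCRIPT_SINGLE member)
def pvWordChar (c : Char) : Bool := !PySem.Chars.isspace c && !pvSpecialB.contains c

-- the token stream both programs compute, as one structural recursion
def pvTokens : List Char → List (List Char)
  | [] => []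
  | c :: cs =>
    if PySem.Chars.isspace c then pvTokens cs
    else if pvSpecialB.contains c then [c] :: pvTokens cs
    else ((c :: cs).takeWhile pvWordChar).map PySem.Chars.upperChar :: pvTokens ((c :: cs).dropWhile pvWordChar)
termination_by l => l.length
decreasing_by
  · simp
  · simp
  · rename_i h1 h2
    rw [List.dropWhile_cons_of_pos (by
      simp only [pvWordChar, Bool.and_eq_true, Bool.not_eq_true']
      exact ⟨Bool.eq_false_iff.mpr h1, Bool.eq_false_iff.mpr h2⟩)]
    have := List.length_dropWhile_le pvWordChar cs
    simp; omega

theorem pvTokens_nil : pvTokens [] = [] := by rw [pvTokens.eq_def]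

theorem pvTokens_cons (c : Char) (cs : List Char) :
    pvTokens (c :: cs) =
      if PySem.Chars.isspace c then pvTokens cs
      else if pvSpecialB.contains c then [c] :: pvTokens cs
      else ((c :: cs).takeWhile pvWordChar).map PySem.Chars.upperChar :: pvTokens ((c :: cs).dropWhile pvWordChar) := by
  rw [pvTokens.eq_def]

-- whitespace-split words, as one structural recursion
def pvWords : List Char → List (List Char)
  | [] => []
  | c :: cs =>
    if h : PySem.Chars.isspace c then pvWords cs
    else ((c :: cs).takeWhile (fun x => !PySem.Chars.isspace x)) :: pvWords ((c :: cs).dropWhile (fun x => !PySem.Chars.isspace x))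
termination_by l => l.length
decreasing_by
  · simp
  · rw [List.dropWhile_cons_of_pos (by simp [h])]
    have := List.length_dropWhile_le (fun x => !PySem.Chars.isspace x) cs
    simp; omega

theorem pvWords_nil : pvWords [] = [] := by rw [pvWords.eq_def]

-- ---- character-class facts ----
theorem pvScriptSingle_eq : pvScriptSingle = pvSpecialB := by decide

theorem contains_single_eq (c : Char) : PySem.Set.contains pvScriptSingle c = pvSpecialB.contains c := by
  rw [pvScriptSingle_eq]; rfl

theorem special_toNat (c : Char) (h : pvSpecialB.contains c = true) :
    c.toNat = 40 ∨ c.toNat = 41 ∨ c.toNat = 61 ∨ c.toNat = 42 ∨ c.toNat = 47 ∨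
    c.toNat = 46 ∨ c.toNat = 44 ∨ c.toNat = 63 ∨ c.toNat = 33 ∨ c.toNat = 59 ∨ c.toNat = 58 := by
  simp only [pvSpecialB, List.contains_eq_mem, List.mem_cons, decide_eq_true_eq] at h
  rcases h with rfl|rfl|rfl|rfl|rfl|rfl|rfl|rfl|rfl|rfl|rfl|h <;> first | decide | simp_all

theorem contains_false_of_bounds (c : Char) (h1 : 65 ≤ c.toNat) (h2 : c.toNat ≤ 122) :
    pvSpecialB.contains c = false := by
  cases hc : pvSpecialB.contains c
  · rfl
  · exfalso; have := special_toNat c hc; omega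

theorem special_not_space (c : Char) (h : pvSpecialB.contains c = true) : PySem.Chars.isspace c = false := by
  have hb := special_toNat c h
  simp only [PySem.Chars.isspace]
  simp only [Bool.or_eq_false_iff, decide_eq_false_iff_not, Bool.and_eq_false_iff]
  omega

theorem punct_special (c : Char) (h : PySem.Set.contains pvPunct c = true) : pvSpecialB.contains c = true := by
  have hp : pvPunct = ['.', ',', '?', '!', ';', ':'] := by decide
  rw [hp] at h
  simp only [PySem.Set.contains, List.contains_eq_mem, List.mem_cons, decide_eq_true_eq] at h
  rcases h with rfl|rfl|rfl|rfl|rfl|rfl|h <;> first | decide | simp_all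

theorem islower_toNat (c : Char) (h : PySem.Chars.islower c = true) : 97 ≤ c.toNat ∧ c.toNat ≤ 122 := by
  simp [PySem.Chars.islower] at h
  exact h

theorem upperChar_toNat (c : Char) (h : PySem.Chars.islower c = true) :
    (PySem.Chars.upperChar c).toNat = c.toNat - 32 := by
  have hb := islower_toNat c h
  simp only [PySem.Chars.upperChar, h, if_pos]
  have hv : (c.toNat - 32).isValidChar := Or.inl (by omega)
  rw [Char.toNat_ofNat, if_pos hv]

theorem isspace_of_toNat (c : Char) (h1 : 65 ≤ c.toNat) (h2 : c.toNat ≤ 122) : PySem.Chars.isspace c = false := by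
  simp only [PySem.Chars.isspace]
  simp only [Bool.or_eq_false_iff, decide_eq_false_iff_not, Bool.and_eq_false_iff]
  omega

theorem upperChar_isspace (c : Char) : PySem.Chars.isspace (PySem.Chars.upperChar c) = PySem.Chars.isspace c := by
  by_cases h : PySem.Chars.islower c
  · have hb := islower_toNat c h
    have ht := upperChar_toNat c h
    rw [isspace_of_toNat c (by omega) (by omega), isspace_of_toNat _ (by omega) (by omega)]
  · simp [PySem.Chars.upperChar, h]

theorem upperChar_special (c : Char) : pvSpecialB.contains (PySem.Chars.upperChar c) = pvSpecialB.contains c := by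
  by_cases h : PySem.Chars.islower c
  · have hb := islower_toNat c h
    have ht := upperChar_toNat c h
    rw [contains_false_of_bounds _ (by omega) (by omega), contains_false_of_bounds c (by omega) (by omega)]
  · simp [PySem.Chars.upperChar, h]

theorem upperChar_of_space (c : Char) (h : PySem.Chars.isspace c = true) : PySem.Chars.upperChar c = c := by
  have hl : PySem.Chars.islower c = false := by
    cases hc : PySem.Chars.islower c
    · rfl
    · have hb := islower_toNat c hc
      rw [isspace_of_toNat c (by omega) (by omega)] at h
      exact absurd h (by simp)
  simp [PySem.Chars.upperChar, hl]

-- ---- comment stripping agrees ----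
theorem not_mem_of_isIn_false (line : List Char) (h : PySem.Chars.isIn [';'] line = false) : (';' : Char) ∉ line := by
  intro hm
  obtain ⟨s, t, rfl⟩ := List.append_of_mem hm
  rw [PySem.Chars.isIn_eq_false_iff] at h
  exact h ⟨s, t, by simp⟩

theorem splitOnMax_go_no_semi : ∀ (fuel : Nat) (l cur : List Char) (acc : List (List Char)),
    l.length < fuel → (';' : Char) ∉ l →
    PySem.Chars.splitOnMax.go [';'] fuel 1 l cur acc = acc.reverse ++ [cur.reverse ++ l] := by
  intro fuel
  induction fuel with
  | zero => intro l cur acc hl; omega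
  | succ fuel ih =>
    intro l cur acc hlen hmem
    cases l with
    | nil => simp [PySem.Chars.splitOnMax.go]
    | cons ch rest =>
      have hch : ch ≠ ';' := fun he => hmem (he ▸ List.mem_cons_self ..)
      have hpre : [';'].isPrefixOf (ch :: rest) = false := by
        simp [List.isPrefixOf]
        exact fun he => absurd he.symm hch
      simp only [PySem.Chars.splitOnMax.go, hpre, if_neg (by omega : ¬(1 : Nat) = 0), Bool.false_eq_true, if_false]
      rw [ih rest (ch :: cur) acc (by simpa using hlen) (fun hm => hmem (List.mem_cons_of_mem _ hm))]
      simp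

theorem splitOnMax_no_semi (l : List Char) (h : (';' : Char) ∉ l) :
    PySem.Chars.splitOnMax l [';'] 1 = [l] := by
  rw [PySem.Chars.splitOnMax]
  rw [if_neg (by omega : ¬(1 : Int) < 0)]
  have := splitOnMax_go_no_semi (l.length + 1) l [] [] (by omega) h
  simpa using this

theorem strip_eq (text : List Char) :
    pvStrip text = PySem.Chars.join ['\n']
      ((PySem.Chars.splitlines text).map (fun line => (PySem.Chars.splitOnMax line [';'] 1).headD [])) := by
  rw [pvStrip]
  rw [show (fun (acc : List (List Char)) (line : List Char) =>
      acc ++ [if PySem.Chars.isIn [';'] line then (PySem.Chars.splitOnMax line [';'] 1).headD [] else line])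
    = (fun acc line => acc ++ [(fun line => if PySem.Chars.isIn [';'] line then (PySem.Chars.splitOnMax line [';'] 1).headD [] else line) line]) from rfl]
  rw [PySem.List.foldl_append_singleton_eq_map]
  rw [List.nil_append]
  congr 1
  apply List.map_congr_left
  intro line _
  by_cases h : PySem.Chars.isIn [';'] line
  · simp [h]
  · rw [if_neg h]
    rw [splitOnMax_no_semi line (not_mem_of_isIn_false line (by simpa using h))]
    rfl

-- ---- A's scan produces pvTokens ----
theorem pvScanWord_eq (text : List Char) (j : Nat) :
    pvScanWord text j = j + ((text.drop j).takeWhile pvWordChar).length := by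
  fun_induction pvScanWord text j with
  | case1 j h hc ih =>
    have hw : pvWordChar text[j] = true := by
      rw [pvWordChar, ← contains_single_eq]; exact hc
    rw [List.drop_eq_getElem_cons h, List.takeWhile_cons_of_pos hw, List.length_cons, ih]
    omega
  | case2 j h hc =>
    have hw : pvWordChar text[j] = false := by
      rw [← Bool.not_eq_true, pvWordChar, ← contains_single_eq]
      simpa using hc
    rw [List.drop_eq_getElem_cons h, List.takeWhile_cons_of_neg (by simp [hw])]
    simp
  | case3 j h =>
    rw [List.drop_eq_nil_of_le (by omega)]
    simp

theorem pvScanA_eq (text : List Char) (i : Nat) (toks : List (List Char)) :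
    pvScanA text i toks = toks ++ pvTokens (text.drop i) := by
  fun_induction pvScanA text i toks with
  | case1 i toks h hsp ih =>
    rw [ih, List.drop_eq_getElem_cons h, pvTokens_cons, if_pos hsp]
  | case2 i toks h hsp hsg ih =>
    have hsg2 : pvSpecialB.contains text[i] = true := by rw [← contains_single_eq]; exact hsg
    rw [ih, List.drop_eq_getElem_cons h, pvTokens_cons, if_neg hsp, if_pos hsg2]
    simp
  | case3 i toks h hsp hsg ih =>
    have hsg2 : ¬ pvSpecialB.contains text[i] = true := by rw [← contains_single_eq]; exact hsg
    have hw : pvWordChar text[i] = true := by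
      simp only [pvWordChar, Bool.and_eq_true, Bool.not_eq_true']
      exact ⟨Bool.eq_false_iff.mpr hsp, Bool.eq_false_iff.mpr hsg2⟩
    have hj : pvScanWord text i = i + ((text.drop i).takeWhile pvWordChar).length := pvScanWord_eq text i
    set tw := (text.drop i).takeWhile pvWordChar with htw
    obtain ⟨t, ht⟩ := List.takeWhile_prefix (l := text.drop i) pvWordChar
    rw [← htw] at ht
    have hdw : (text.drop i).dropWhile pvWordChar = t := by
      have h2 := List.takeWhile_append_dropWhile (p := pvWordChar) (l := text.drop i)
      rw [← htw] at h2
      exact List.append_cancel_left (h2.trans ht.symm)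
    have hslice : PySem.List.slice text (some (i : Int)) (some ((pvScanWord text i : Nat) : Int)) = tw := by
      rw [PySem.List.slice_toNat text (by omega) (by omega)]
      simp only [Int.toNat_natCast]
      rw [hj, Nat.add_sub_cancel_left, ← ht, List.take_left]
    have hdrop : text.drop (pvScanWord text i) = t := by
      rw [hj, ← List.drop_drop, ← ht, List.drop_left]
    rw [ih, hslice, hdrop]
    conv_rhs => rw [List.drop_eq_getElem_cons h, pvTokens_cons, if_neg hsp, if_neg hsg2,
      ← List.drop_eq_getElem_cons h, ← htw, hdw]
    simp [PySem.Chars.upper]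
  | case4 i toks h =>
    rw [List.drop_eq_nil_of_le (by omega), pvTokens_nil]
    simp

-- ---- every pvTokens token is nonempty, and is a single char or all non-special ----
theorem pvTokens_good : ∀ (cs : List Char),
    ∀ tk ∈ pvTokens cs, tk ≠ [] ∧ (tk.length = 1 ∨ ∀ x ∈ tk, pvSpecialB.contains x = false) := by
  have main : ∀ (n : Nat) (cs : List Char), cs.length ≤ n →
      ∀ tk ∈ pvTokens cs, tk ≠ [] ∧ (tk.length = 1 ∨ ∀ x ∈ tk, pvSpecialB.contains x = false) := by
    intro n
    induction n with
    | zero =>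
      intro cs hcs
      have : cs = [] := List.length_eq_zero_iff.mp (by omega)
      subst this
      rw [pvTokens_nil]; simp
    | succ n ih =>
      intro cs hlen tk hm
      cases cs with
      | nil => rw [pvTokens_nil] at hm; simp at hm
      | cons c cs =>
        rw [pvTokens_cons] at hm
        by_cases hs : PySem.Chars.isspace c
        · rw [if_pos hs] at hm
          exact ih cs (by simpa using hlen) tk hm
        · rw [if_neg hs] at hm
          by_cases hsp : pvSpecialB.contains c
          · rw [if_pos hsp] at hm
            rcases List.mem_cons.mp hm with rfl | hm
            · exact ⟨by simp, Or.inl rfl⟩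
            · exact ih cs (by simpa using hlen) tk hm
          · rw [if_neg hsp] at hm
            have hw : pvWordChar c = true := by
              simp only [pvWordChar, Bool.and_eq_true, Bool.not_eq_true']
              exact ⟨Bool.eq_false_iff.mpr hs, Bool.eq_false_iff.mpr hsp⟩
            rcases List.mem_cons.mp hm with rfl | hm
            · constructor
              · rw [List.takeWhile_cons_of_pos hw]; simp
              · right
                intro x hx
                obtain ⟨y, hy, rfl⟩ := List.mem_map.mp hx
                have hyw : pvWordChar y = true := List.mem_takeWhile_imp hy
                have hy2 : pvSpecialB.contains y = false := by
                  simp only [pvWordChar, Bool.and_eq_true, Bool.not_eq_true'] at hyw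
                  exact hyw.2
                rw [upperChar_special, hy2]
            · have hr_len : ((c :: cs).dropWhile pvWordChar).length ≤ n := by
                rw [List.dropWhile_cons_of_pos hw]
                have := List.length_dropWhile_le pvWordChar cs
                simp at hlen; omega
              exact ih _ (by omega) tk hm
  intro cs
  exact main cs.length cs (le_refl _)

-- ---- split₀ is pvWords ----
theorem split₀_go_spec : ∀ (s cur : List Char) (acc : List (List Char)),
    PySem.Chars.split₀.go s cur acc = acc.reverse ++
      (if cur.isEmpty then pvWords s
       else (cur.reverse ++ s.takeWhile (fun x => !PySem.Chars.isspace x)) ::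
            pvWords (s.dropWhile (fun x => !PySem.Chars.isspace x))) := by
  intro s
  induction s with
  | nil =>
    intro cur acc
    by_cases h : cur.isEmpty <;> simp [PySem.Chars.split₀.go, h, pvWords]
  | cons c rest ih =>
    intro cur acc
    by_cases hs : PySem.Chars.isspace c
    · by_cases hc : cur.isEmpty
      · simp only [PySem.Chars.split₀.go, hs, if_pos, hc]
        rw [ih [] acc]
        simp [pvWords, hs]
      · simp only [PySem.Chars.split₀.go, hs, if_pos, hc, Bool.false_eq_true, if_false]
        rw [ih [] (cur.reverse :: acc)]
        rw [List.takeWhile_cons_of_neg (by simp [hs]), List.dropWhile_cons_of_neg (by simp [hs])]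
        simp [pvWords, hs]
    · simp only [PySem.Chars.split₀.go, hs, Bool.false_eq_true, if_false]
      rw [ih (c :: cur) acc]
      rw [List.takeWhile_cons_of_pos (by simp [hs]), List.dropWhile_cons_of_pos (by simp [hs])]
      by_cases hc : cur.isEmpty
      · have : cur = [] := by simpa using hc
        subst this
        simp [pvWords, hs]
      · simp only [List.isEmpty_cons, hc, Bool.false_eq_true, if_false]
        simp

theorem split₀_eq_pvWords (s : List Char) : PySem.Chars.split₀ s = pvWords s := by
  rw [PySem.Chars.split₀, split₀_go_spec]
  simp

-- ---- B's pad-and-split produces pvTokens ----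

theorem takeWhile_all_append (p : Char → Bool) (v ys : List Char) (h : ∀ x ∈ v, p x = true) :
    (v ++ ys).takeWhile p = v ++ ys.takeWhile p ∧ (v ++ ys).dropWhile p = ys.dropWhile p := by
  induction v with
  | nil => simp
  | cons a v ih =>
    have ha : p a = true := h a (List.mem_cons_self ..)
    have := ih (fun x hx => h x (List.mem_cons_of_mem _ hx))
    simp only [List.cons_append, List.takeWhile_cons_of_pos ha, List.dropWhile_cons_of_pos ha]
    exact ⟨by rw [this.1], this.2⟩

theorem pvWords_word (v ys : List Char) (hv : v ≠ [])
    (hvs : ∀ x ∈ v, PySem.Chars.isspace x = false)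
    (hys : ys = [] ∨ ∃ d ys', ys = d :: ys' ∧ PySem.Chars.isspace d = true) :
    pvWords (v ++ ys) = v :: pvWords ys := by
  obtain ⟨a, v', rfl⟩ := List.exists_cons_of_ne_nil hv
  have hall : ∀ x ∈ a :: v', (fun x => !PySem.Chars.isspace x) x = true := by
    intro x hx; simp [hvs x hx]
  have htw := takeWhile_all_append (fun x => !PySem.Chars.isspace x) (a :: v') ys hall
  have hys_tw : ys.takeWhile (fun x => !PySem.Chars.isspace x) = [] ∧
      ys.dropWhile (fun x => !PySem.Chars.isspace x) = ys := by
    rcases hys with rfl | ⟨d, ys', rfl, hd⟩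
    · simp
    · exact ⟨List.takeWhile_cons_of_neg (by simp [hd]), List.dropWhile_cons_of_neg (by simp [hd])⟩
  rw [List.cons_append, pvWords, dif_neg (by simp [hvs a (List.mem_cons_self ..)])]
  rw [← List.cons_append, htw.1, htw.2, hys_tw.1, hys_tw.2]
  simp

theorem pvWords_skip (d : Char) (ys : List Char) (hd : PySem.Chars.isspace d = true) :
    pvWords (d :: ys) = pvWords ys := by
  rw [pvWords, dif_pos hd]

def pvPad (c : Char) : List Char :=
  if pvSpecialB.contains c then [' ', c, ' '] else [PySem.Chars.upperChar c]

theorem pad_word (w : List Char) (h : ∀ x ∈ w, pvSpecialB.contains x = false) :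
    (w.map pvPad).flatten = w.map PySem.Chars.upperChar := by
  induction w with
  | nil => rfl
  | cons a w ih =>
    simp only [List.map_cons, List.flatten_cons, pvPad, h a (List.mem_cons_self ..), Bool.false_eq_true, if_false]
    rw [ih (fun x hx => h x (List.mem_cons_of_mem _ hx))]
    rfl

theorem pad_head_space (r : List Char) (hr : r = [] ∨ ∃ d r', r = d :: r' ∧ pvWordChar d = false) :
    (r.map pvPad).flatten = [] ∨
    ∃ d ys', (r.map pvPad).flatten = d :: ys' ∧ PySem.Chars.isspace d = true := by
  rcases hr with rfl | ⟨d, r', rfl, hd⟩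
  · left; rfl
  · right
    by_cases hsp : pvSpecialB.contains d
    · have hp : pvPad d = [' ', d, ' '] := by rw [pvPad, if_pos hsp]
      exact ⟨' ', d :: ' ' :: (r'.map pvPad).flatten, by simp [hp], by decide⟩
    · have hd' : PySem.Chars.isspace d = true := by
        simp only [pvWordChar, Bool.and_eq_false_iff, Bool.not_eq_false'] at hd
        rcases hd with hd | hd
        · exact hd
        · exact absurd hd hsp
      have hp : pvPad d = [PySem.Chars.upperChar d] := by rw [pvPad, if_neg hsp]
      refine ⟨PySem.Chars.upperChar d, (r'.map pvPad).flatten, by simp [hp], ?_⟩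
      rw [upperChar_isspace]; exact hd'

theorem pvWords_pad : ∀ (cs : List Char),
    pvWords ((cs.map pvPad).flatten) = pvTokens cs := by
  have main : ∀ (n : Nat) (cs : List Char), cs.length ≤ n →
      pvWords ((cs.map pvPad).flatten) = pvTokens cs := by
    intro n
    induction n with
    | zero =>
      intro cs hcs
      have : cs = [] := List.length_eq_zero_iff.mp (by omega)
      subst this
      rw [pvTokens_nil]; simp [pvWords_nil]
    | succ n ih =>
      intro cs hlen
      cases cs with
      | nil => rw [pvTokens_nil]; simp [pvWords_nil]
      | cons c cs =>
        by_cases hs : PySem.Chars.isspace c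
        · have hns : pvSpecialB.contains c = false := by
            cases hc : pvSpecialB.contains c
            · rfl
            · rw [special_not_space c hc] at hs; exact absurd hs (by simp)
          simp only [List.map_cons, List.flatten_cons, pvPad, hns, Bool.false_eq_true, if_false]
          rw [upperChar_of_space c hs, List.singleton_append, pvWords_skip c _ hs]
          rw [pvTokens_cons, if_pos hs]
          exact ih cs (by simpa using hlen)
        · by_cases hsp : pvSpecialB.contains c
          · simp only [List.map_cons, List.flatten_cons, pvPad, hsp, if_true]
            rw [show (' ' :: c :: ' ' :: []) ++ ((cs.map pvPad).flatten)
                = ' ' :: ([c] ++ (' ' :: (cs.map pvPad).flatten)) from rfl]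
            rw [pvWords_skip _ _ (by decide)]
            rw [pvWords_word [c] _ (by simp)
              (by intro x hx; rcases List.mem_singleton.mp hx with rfl; exact special_not_space x hsp)
              (Or.inr ⟨' ', _, rfl, by decide⟩)]
            rw [pvWords_skip _ _ (by decide)]
            rw [pvTokens_cons, if_neg hs, if_pos hsp]
            rw [ih cs (by simpa using hlen)]
          · -- word run
            have hw : pvWordChar c = true := by
              simp only [pvWordChar, Bool.and_eq_true, Bool.not_eq_true']
              exact ⟨Bool.eq_false_iff.mpr hs, Bool.eq_false_iff.mpr hsp⟩
            obtain ⟨w, r, hwdef, hrdef⟩ :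
                ∃ w r, w = (c :: cs).takeWhile pvWordChar ∧ r = (c :: cs).dropWhile pvWordChar :=
              ⟨_, _, rfl, rfl⟩
            have hsplit : w ++ r = c :: cs := by
              rw [hwdef, hrdef]; exact List.takeWhile_append_dropWhile
            have hw_all : ∀ x ∈ w, pvWordChar x = true := by
              rw [hwdef]; exact fun x hx => List.mem_takeWhile_imp hx
            have hw_ne : w ≠ [] := by
              rw [hwdef, List.takeWhile_cons_of_pos hw]; simp
            have hr_len : r.length ≤ n := by
              rw [hrdef, List.dropWhile_cons_of_pos hw]
              have := List.length_dropWhile_le pvWordChar cs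
              simp at hlen; omega
            have hr_head : r = [] ∨ ∃ d r', r = d :: r' ∧ pvWordChar d = false := by
              cases hr : r with
              | nil => exact Or.inl rfl
              | cons d r' =>
                refine Or.inr ⟨d, r', rfl, ?_⟩
                have hd2 : (c :: cs).dropWhile pvWordChar = d :: r' := hrdef.symm.trans hr
                have hne : (c :: cs).dropWhile pvWordChar ≠ [] := by rw [hd2]; simp
                have := List.head_dropWhile_not pvWordChar hne
                simp only [hd2] at this
                simpa using this
            conv_lhs => rw [← hsplit]
            rw [List.map_append, List.flatten_append]
            rw [pad_word w (fun x hx => by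
              have := hw_all x hx
              simp only [pvWordChar, Bool.and_eq_true, Bool.not_eq_true'] at this
              exact this.2)]
            rw [pvWords_word (w.map PySem.Chars.upperChar) _
              (by simpa using hw_ne)
              (by
                intro x hx
                obtain ⟨y, hy, rfl⟩ := List.mem_map.mp hx
                have := hw_all y hy
                simp only [pvWordChar, Bool.and_eq_true, Bool.not_eq_true'] at this
                rw [upperChar_isspace]; exact this.1)
              (pad_head_space r hr_head)]
            rw [pvTokens_cons, if_neg hs, if_neg hsp]
            rw [ih r hr_len]
            rw [hwdef, hrdef]
  intro cs
  exact main cs.length cs (le_refl _)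

-- ---- the dead trailing-punctuation pass and the empty filter are identities ----
theorem mem_of_pyGet? {α : Type} (l : List α) (i : Int) (x : α) (h : PySem.List.pyGet? l i = some x) : x ∈ l := by
  rw [PySem.List.pyGet?] at h
  obtain ⟨k, _, hk2⟩ := Option.bind_eq_some_iff.mp h
  exact List.mem_of_getElem? hk2

theorem dead_pass (toks : List (List Char))
    (hg : ∀ tk ∈ toks, tk ≠ [] ∧ (tk.length = 1 ∨ ∀ x ∈ tk, pvSpecialB.contains x = false)) :
    toks.foldl (fun acc tk =>
      match PySem.List.pyGet? tk (-1) with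
      | some last =>
        if 2 ≤ tk.length ∧ PySem.Set.contains pvPunct last = true ∧
            (PySem.List.slice tk none (some (-1))).all (fun ch => !PySem.Set.contains pvScriptSingle ch) then
          acc ++ [PySem.List.slice tk none (some (-1)), [last]]
        else acc ++ [tk]
      | none => acc ++ [tk]) [] = toks := by
  have h1 : ∀ (acc : List (List Char)) (tk : List Char), tk ∈ toks →
      (match PySem.List.pyGet? tk (-1) with
      | some last =>
        if 2 ≤ tk.length ∧ PySem.Set.contains pvPunct last = true ∧
            (PySem.List.slice tk none (some (-1))).all (fun ch => !PySem.Set.contains pvScriptSingle ch) then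
          acc ++ [PySem.List.slice tk none (some (-1)), [last]]
        else acc ++ [tk]
      | none => acc ++ [tk]) = acc ++ [tk] := by
    intro acc tk hm
    cases hg' : PySem.List.pyGet? tk (-1) with
    | none => rfl
    | some last =>
      show (if 2 ≤ tk.length ∧ PySem.Set.contains pvPunct last = true ∧
            (PySem.List.slice tk none (some (-1))).all (fun ch => !PySem.Set.contains pvScriptSingle ch) = true then
          acc ++ [PySem.List.slice tk none (some (-1)), [last]]
        else acc ++ [tk]) = acc ++ [tk]
      rw [if_neg ?_]
      rcases (hg tk hm).2 with h1 | h2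
      · rintro ⟨hlen, -, -⟩; omega
      · rintro ⟨-, hpunct, -⟩
        have hmem := mem_of_pyGet? tk (-1) last hg'
        have hps := punct_special last hpunct
        rw [h2 last hmem] at hps
        exact Bool.false_ne_true hps
  calc toks.foldl _ [] = toks.foldl (fun acc tk => acc ++ [tk]) [] := PySem.List.foldl_congr_mem toks _ (fun acc tk => acc ++ [tk]) [] h1
    _ = [] ++ toks := PySem.List.foldl_append_singleton_eq_self ..
    _ = toks := by simp

theorem filter_nonempty (toks : List (List Char)) (hg : ∀ tk ∈ toks, tk ≠ []) :
    toks.filter (fun tk => !tk.isEmpty) = toks := by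
  apply List.filter_eq_self.mpr
  intro tk hm
  simpa using hg tk hm

-- ===== VERDICT (by name: the statement is the Claim_ definition above) =====
theorem tokenize_script_py_spec : Claim_equal_tokenize_script_py := by
  intro text _
  show tokenize_script_py text = tokenize_script_py_alt text
  simp only [tokenize_script_py, tokenize_script_py_alt]
  rw [strip_eq]
  set s := PySem.Chars.join ['\n']
    ((PySem.Chars.splitlines text.toList).map (fun line => (PySem.Chars.splitOnMax line [';'] 1).headD [])) with hs
  have hA : pvScanA s 0 [] = pvTokens s := by
    rw [pvScanA_eq]; simp
  rw [hA]
  rw [dead_pass (pvTokens s) (pvTokens_good s)]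
  rw [filter_nonempty (pvTokens s) (fun tk hm => (pvTokens_good s tk hm).1)]
  rw [split₀_eq_pvWords]
  congr 1
  rw [show (fun c => if pvSpecialB.contains c then [' ', c, ' '] else [PySem.Chars.upperChar c]) = pvPad from rfl]
  exact (pvWords_pad s).symm
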